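-- pv_equiv track=rewrite | github.com/wherby/code | contest/00000c443d154/c484/q1/t1.py | residuePrefixes
-- ===== SOURCE A (Python) =====
-- def residuePrefixes(s: str) -> int:
--     acc = 0
--     dic = {}
--     for i,a in enumerate(s):
--         dic[a] =1
--         if len(dic.keys()) == (i+1)%3:
--             acc +=1
--     return acc
-- ===== SOURCE B (Python) =====
-- def _cnt(lo, hi, r):
--     # number of integers L with lo <= L <= hi and L % 3 == r
--     if hi < lo:
--         return 0
--     return (hi - r) // 3 - (lo - 1 - r) // 3
--
-- def residuePrefixes(s: str) -> int:
--     # A prefix of length L matches iff its distinct-char count equals L % 3.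
--     # Distinct count is nondecreasing and >= 1, so only the region with
--     # 1 distinct char (lengths 1..r1, need L%3==1) and the region with
--     # 2 distinct chars (lengths r1+1..r2, need L%3==2) can contribute.
--     if not s:
--         return 0
--     c0 = s[0]
--     r1 = 1
--     while r1 < len(s) and s[r1] == c0:
--         r1 += 1
--     if r1 == len(s):
--         r2 = r1
--     else:
--         c1 = s[r1]
--         r2 = r1 + 1
--         while r2 < len(s) and (s[r2] == c0 or s[r2] == c1):
--             r2 += 1
--     return _cnt(1, r1, 1) + _cnt(r1 + 1, r2, 2)
-- ===== Notes on version B (the rewrite author's own statement) =====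
-- stated objective: faster
-- what changed: Replaces the full scan with a dict per prefix by locating the 1-distinct and 2-distinct segment boundaries (distinct count is nondecreasing and (L mod 3) < 3, so nothing after the third distinct char can match) and counting matching lengths in each segment with closed-form residue-range arithmetic.
import Mathlib
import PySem

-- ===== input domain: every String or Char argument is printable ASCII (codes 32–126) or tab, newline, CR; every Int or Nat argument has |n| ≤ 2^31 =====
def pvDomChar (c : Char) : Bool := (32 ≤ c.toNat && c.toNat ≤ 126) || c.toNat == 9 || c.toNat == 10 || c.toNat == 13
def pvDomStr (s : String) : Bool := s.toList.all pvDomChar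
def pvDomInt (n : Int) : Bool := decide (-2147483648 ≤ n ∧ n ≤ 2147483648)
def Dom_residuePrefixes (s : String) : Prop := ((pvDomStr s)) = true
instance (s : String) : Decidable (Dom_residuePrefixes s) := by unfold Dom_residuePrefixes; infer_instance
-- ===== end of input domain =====

-- B stops at the third distinct character and counts matching prefix lengths by residue-range
-- arithmetic instead of scanning the whole string with a dict (objective: faster, early stop).

-- ===== PORT A =====
-- literal port of A: fold over enumerate(s), dic[a] = 1, count i with len(dic.keys()) == (i+1)%3
def residuePrefixes (s : String) : Int :=
  (((PySem.List.enumerate s.toList 0).foldl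
    (fun (st : Int × PySem.Dict Char Int) (p : Int × Char) =>
      let dic := st.2.insert p.2 1
      (if ((dic.keys.length : Int) == PySem.Int.mod (p.1 + 1) 3) then st.1 + 1 else st.1, dic))
    (0, PySem.Dict.empty))).1

-- ===== PORT B =====
-- the while loops of Source B: length of the leading run satisfying p, plus the remaining suffix
def pvRunB (p : Char → Bool) : List Char → Nat × List Char
  | [] => (0, [])
  | a :: t => if p a then let r := pvRunB p t; (r.1 + 1, r.2) else (0, a :: t)

-- _cnt of Source B: number of L with lo ≤ L ≤ hi and L % 3 = r
def pvCntB (lo hi r : Int) : Int :=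
  if hi < lo then 0
  else PySem.Int.floordiv (hi - r) 3 - PySem.Int.floordiv (lo - 1 - r) 3

def residuePrefixes_alt (s : String) : Int :=
  match s.toList with
  | [] => 0
  | c0 :: rest =>
    let p1 := pvRunB (fun a => a == c0) rest
    let r1 : Int := 1 + p1.1
    let r2 : Int :=
      match p1.2 with
      | [] => r1
      | c1 :: rest2 => r1 + 1 + (pvRunB (fun a => a == c0 || a == c1) rest2).1
    pvCntB 1 r1 1 + pvCntB (r1 + 1) r2 2

-- ===== PRECONDITION & SPEC =====
def Spec_residuePrefixes (s : String) (out : Int) : Prop := out = residuePrefixes_alt s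
instance (s : String) (out : Int) : Decidable (Spec_residuePrefixes s out) := by unfold Spec_residuePrefixes; infer_instance

-- ===== CLAIM (what is proved, stated in full; the proofs are below) =====
def Claim_equal_residuePrefixes : Prop := ∀ (s : String), Dom_residuePrefixes s → Spec_residuePrefixes s (residuePrefixes s)

-- ===== LEMMAS AND PROOFS =====

-- characterisation of the rest of A's loop: set of chars seen so far, next index i
def Fspec (S : PySem.Set Char) (i : Int) : List Char → Int
  | [] => 0
  | a :: t =>
    let S' := PySem.Set.add S a
    (if ((S'.length : Int) == PySem.Int.mod (i + 1) 3) then 1 else 0) + Fspec S' (i + 1) t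

-- count of j in i+1 .. i+n with j % 3 = r, as a recursion (ties the two sides together)
def CSpec (i r : Int) : Nat → Int
  | 0 => 0
  | n + 1 => (if (r == PySem.Int.mod (i + 1) 3) then 1 else 0) + CSpec (i + 1) r n

theorem keys_insert_eq_add (d : PySem.Dict Char Int) (a : Char) (v : Int) :
    (d.insert a v).keys = PySem.Set.add d.keys a := by
  by_cases h : d.contains a = true
  · rw [PySem.Dict.keys_insert_of_contains d v h]
    rw [PySem.Dict.contains_eq_decide_mem_keys] at h
    simp only [PySem.Set.add, PySem.Set.contains]
    simp at h; simp [h]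
  · rw [PySem.Dict.keys_insert_of_not_contains d v (by simpa using h)]
    rw [PySem.Dict.contains_eq_decide_mem_keys] at h
    simp only [PySem.Set.add, PySem.Set.contains]
    simp at h; simp [h]

theorem A_loop_eq_Fspec (l : List Char) : ∀ (i acc : Int) (d : PySem.Dict Char Int),
    ((PySem.List.enumerate l i).foldl
      (fun (st : Int × PySem.Dict Char Int) (p : Int × Char) =>
        let dic := st.2.insert p.2 1
        (if ((dic.keys.length : Int) == PySem.Int.mod (p.1 + 1) 3) then st.1 + 1 else st.1, dic))
      (acc, d)).1 = acc + Fspec d.keys i l := by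
  induction l with
  | nil => intro i acc d; simp [PySem.List.enumerate_nil, Fspec]
  | cons a t ih =>
    intro i acc d
    rw [PySem.List.enumerate_cons, List.foldl_cons, ih]
    simp only [Fspec, keys_insert_eq_add]
    split <;> omega

theorem mod3_lt (i : Int) : PySem.Int.mod i 3 < 3 ∧ 0 ≤ PySem.Int.mod i 3 := by
  rw [PySem.Int.mod_eq_emod_of_pos (b := 3) (by norm_num)]
  omega

theorem add_len_ge (S : PySem.Set Char) (a : Char) : S.length ≤ (PySem.Set.add S a).length := by
  simp only [PySem.Set.add]; split <;> simp

theorem Fspec_big (l : List Char) : ∀ (S : PySem.Set Char) (i : Int), 3 ≤ S.length →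
    Fspec S i l = 0 := by
  induction l with
  | nil => intro S i h; simp [Fspec]
  | cons a t ih =>
    intro S i h
    have h2 := add_len_ge S a
    have h3 := mod3_lt (i + 1)
    simp only [Fspec]
    rw [ih _ _ (le_trans h h2)]
    rw [PySem.Int.mod_eq_emod_of_pos (b := 3) (by norm_num)] at h3 ⊢
    have : ¬ (((PySem.Set.add S a).length : Int) = (i + 1) % 3) := by omega
    simp [this]

theorem Fspec_two (l : List Char) : ∀ (c0 c1 : Char) (i : Int), c0 ≠ c1 →
    Fspec [c0, c1] i l = CSpec i 2 ((pvRunB (fun a => a == c0 || a == c1) l).1) := by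
  induction l with
  | nil => intro c0 c1 i h; simp [Fspec, pvRunB, CSpec]
  | cons a t ih =>
    intro c0 c1 i h
    by_cases ha : (a == c0 || a == c1) = true
    · have hadd : PySem.Set.add [c0, c1] a = [c0, c1] := by
        simp only [PySem.Set.add, PySem.Set.contains]
        simp at ha ⊢
        rcases ha with h1 | h1 <;> simp [h1]
      simp only [Fspec, pvRunB, ha, if_pos, hadd, ih _ _ _ h]
      simp only [CSpec]
      norm_num
    · have hadd : PySem.Set.add [c0, c1] a = [c0, c1, a] := by
        simp only [PySem.Set.add, PySem.Set.contains]
        simp at ha ⊢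
        simp [ha]
      have ha' : (a == c0 || a == c1) = false := by simpa using ha
      simp only [Fspec, pvRunB, ha', Bool.false_eq_true, if_false, hadd]
      rw [Fspec_big t _ _ (by simp)]
      have h3 := mod3_lt (i + 1)
      rw [PySem.Int.mod_eq_emod_of_pos (b := 3) (by norm_num)] at h3 ⊢
      simp only [List.length_cons, List.length_nil, beq_iff_eq, CSpec]
      split <;> omega

theorem Fspec_one (l : List Char) : ∀ (c0 : Char) (i : Int),
    Fspec [c0] i l =
      CSpec i 1 (pvRunB (fun a => a == c0) l).1 +
      (match (pvRunB (fun a => a == c0) l).2 with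
       | [] => 0
       | c1 :: rest2 => CSpec (i + ((pvRunB (fun a => a == c0) l).1 : Int)) 2
           ((pvRunB (fun a => a == c0 || a == c1) rest2).1 + 1)) := by
  induction l with
  | nil => intro c0 i; simp [Fspec, pvRunB, CSpec]
  | cons a t ih =>
    intro c0 i
    by_cases ha : (a == c0) = true
    · have heq : a = c0 := by simpa using ha
      subst heq
      have hadd : PySem.Set.add [a] a = [a] := by simp [PySem.Set.add, PySem.Set.contains]
      simp only [Fspec, pvRunB, ha, if_pos, hadd, ih a (i + 1)]
      simp only [CSpec, List.length_cons, List.length_nil, beq_iff_eq]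
      cases hr : (pvRunB (fun x => x == a) t).2 with
      | nil => simp
      | cons c1 rest2 =>
        simp only [PySem.Int.mod_eq_emod_of_pos (show (0:Int) < 3 by norm_num)]
        push_cast
        ring_nf
    · have ha' : (a == c0) = false := by simpa using ha
      have hne : c0 ≠ a := by intro h; subst h; simp at ha'
      have hadd : PySem.Set.add [c0] a = [c0, a] := by
        simp [PySem.Set.add, PySem.Set.contains]
        intro h; subst h; simp at ha'
      simp only [Fspec, pvRunB, ha', Bool.false_eq_true, if_false, hadd]
      rw [Fspec_two t c0 a _ hne]
      simp only [CSpec, List.length_cons, List.length_nil, beq_iff_eq]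
      push_cast
      simp only [add_zero, PySem.Int.mod_eq_emod_of_pos (show (0:Int) < 3 by norm_num)]
      rw [zero_add]

theorem CSpec_eq_cnt (n : Nat) : ∀ (i r : Int), 0 ≤ r → r < 3 →
    CSpec i r n = pvCntB (i + 1) (i + n) r := by
  induction n with
  | zero =>
    intro i r h0 h3
    simp only [CSpec, pvCntB]
    rw [if_pos (by push_cast; omega)]
  | succ n ih =>
    intro i r h0 h3
    simp only [CSpec, ih (i + 1) r h0 h3, pvCntB, beq_iff_eq]
    rw [PySem.Int.mod_eq_emod_of_pos (b := 3) (by norm_num)]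
    rw [PySem.Int.floordiv_eq_ediv_of_pos (b := 3) (by norm_num),
        PySem.Int.floordiv_eq_ediv_of_pos (b := 3) (by norm_num)]
    push_cast
    split_ifs <;>
      (try rw [PySem.Int.floordiv_eq_ediv_of_pos (b := 3) (by norm_num),
        PySem.Int.floordiv_eq_ediv_of_pos (b := 3) (by norm_num)]) <;> omega

-- ===== VERDICT (by name: the statement is the Claim_ definition above) =====
theorem residuePrefixes_spec : Claim_equal_residuePrefixes := by
  intro s _
  show residuePrefixes s = residuePrefixes_alt s
  unfold residuePrefixes residuePrefixes_alt
  rw [A_loop_eq_Fspec s.toList 0 0 PySem.Dict.empty, PySem.Dict.keys_empty, zero_add]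
  cases hl : s.toList with
  | nil => simp [Fspec]
  | cons c0 rest =>
    have h1 : Fspec [] 0 (c0 :: rest) = 1 + Fspec [c0] 1 rest := by
      simp [Fspec, PySem.Set.add, PySem.Set.contains]
    rw [h1, Fspec_one rest c0 1]
    cases hr : (pvRunB (fun a => a == c0) rest).2 with
    | nil =>
      simp only [hr]
      have hC : (1:Int) + (CSpec 1 1 (pvRunB (fun a => a == c0) rest).1 + 0) =
          CSpec 0 1 ((pvRunB (fun a => a == c0) rest).1 + 1) := by
        simp [CSpec]
      rw [hC, CSpec_eq_cnt _ 0 1 (by norm_num) (by norm_num)]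
      have e1 : (0:Int) + (((pvRunB (fun a => a == c0) rest).1 + 1 : Nat) : Int) =
          1 + ((pvRunB (fun a => a == c0) rest).1 : Int) := by push_cast; ring
      rw [e1]
      have e2 : pvCntB (1 + ((pvRunB (fun a => a == c0) rest).1 : Int) + 1)
          (1 + ((pvRunB (fun a => a == c0) rest).1 : Int)) 2 = 0 := by
        unfold pvCntB
        rw [if_pos (by omega)]
      rw [e2, add_zero]
      norm_num
    | cons c1 rest2 =>
      simp only [hr]
      have hC : (1:Int) + (CSpec 1 1 (pvRunB (fun a => a == c0) rest).1 +
          CSpec (1 + ((pvRunB (fun a => a == c0) rest).1 : Int)) 2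
            ((pvRunB (fun a => a == c0 || a == c1) rest2).1 + 1)) =
          CSpec 0 1 ((pvRunB (fun a => a == c0) rest).1 + 1) +
          CSpec (1 + ((pvRunB (fun a => a == c0) rest).1 : Int)) 2
            ((pvRunB (fun a => a == c0 || a == c1) rest2).1 + 1) := by
        simp [CSpec]
        ring
      rw [hC, CSpec_eq_cnt _ 0 1 (by norm_num) (by norm_num),
          CSpec_eq_cnt _ _ 2 (by norm_num) (by norm_num)]
      have e1 : (0:Int) + (((pvRunB (fun a => a == c0) rest).1 + 1 : Nat) : Int) =
          1 + ((pvRunB (fun a => a == c0) rest).1 : Int) := by push_cast; ring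
      have e2 : 1 + ((pvRunB (fun a => a == c0) rest).1 : Int) +
          (((pvRunB (fun a => a == c0 || a == c1) rest2).1 + 1 : Nat) : Int) =
          1 + ((pvRunB (fun a => a == c0) rest).1 : Int) + 1 +
          ((pvRunB (fun a => a == c0 || a == c1) rest2).1 : Int) := by push_cast; ring
      rw [e1, e2]
      norm_num
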